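-- pv_equiv track=rewrite | github.com/OlegKumachev/Regular-expressions | Regular_expressions.py | double_delete
-- ===== SOURCE A (Python) =====
-- def double_delete(text):
--     person_data = {}
--     for data in text:
--         if data[0] in person_data:
--             con_val = person_data[data[0]]
--             for ind in range(len(con_val)):
--                 if data[ind]:
--                     con_val[ind] = data[ind]
--         else:
--             person_data[data[0]] = data
--     return list(person_data.values())
-- ===== SOURCE B (Python) =====
-- def double_delete(text):
--     # Phase 1: group records by their first field, preserving first-encounter key order.
--     groups = {}
--     for data in text:
--         groups.setdefault(data[0], []).append(data)
--     # Phase 2: merge each group onto its first record (same object, mutated in place like A).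
--     result = []
--     for group in groups.values():
--         base = group[0]
--         for data in group[1:]:
--             for ind in range(len(base)):
--                 if data[ind]:
--                     base[ind] = data[ind]
--         result.append(base)
--     return result
-- ===== Notes on version B (the rewrite author's own statement) =====
-- stated objective: alternative
-- what changed: A merges each record into its key's entry while scanning once over the input; B decomposes the task into two phases: first group all records by their first field into a dict of lists (preserving first-encounter order), then merge each group onto its first record and collect the results.
import Mathlib
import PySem

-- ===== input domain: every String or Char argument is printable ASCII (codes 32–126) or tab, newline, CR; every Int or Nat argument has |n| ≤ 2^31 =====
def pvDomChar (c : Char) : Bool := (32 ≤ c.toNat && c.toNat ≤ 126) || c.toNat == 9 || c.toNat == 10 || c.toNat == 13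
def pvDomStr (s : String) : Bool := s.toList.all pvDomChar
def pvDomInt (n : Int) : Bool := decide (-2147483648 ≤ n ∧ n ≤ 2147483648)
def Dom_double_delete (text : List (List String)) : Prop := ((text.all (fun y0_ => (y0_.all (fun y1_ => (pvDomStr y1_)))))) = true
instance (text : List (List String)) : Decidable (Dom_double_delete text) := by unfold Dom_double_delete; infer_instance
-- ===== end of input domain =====

-- B replaces A's single-pass dict-merge by a two-phase group-by-key then merge-per-group decomposition
-- (same return value; like A, both Pythons mutate the first record of each key group in place —
-- the equivalence proved here is about the return value).

-- the shared inner merge loop: for ind in range(len(conVal)): if data[ind]: conVal[ind] = data[ind]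
def mergeLoop (conVal data : List String) : List String :=
  (List.range conVal.length).foldl
    (fun cv (ind : Nat) =>
      match PySem.List.pyGet? data ((ind : Int)) with
      | some s => if s = "" then cv else cv.set ind s
      | none => cv)   -- Python raises IndexError here; excluded by Pre_
    conVal

-- ===== PORT A =====
def stepA (pd : PySem.Dict String (List String)) (data : List String) :
    PySem.Dict String (List String) :=
  match data.head? with
  | none => pd        -- data[0] raises IndexError in Python; excluded by Pre_
  | some k =>
    match pd.get? k with
    | some conVal => pd.insert k (mergeLoop conVal data)   -- in-place mutation of the stored list
    | none => pd.insert k data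

def double_delete (text : List (List String)) : List (List String) :=
  (text.foldl stepA PySem.Dict.empty).values

-- ===== PORT B =====
-- phase 1: groups.setdefault(data[0], []).append(data)
def stepB (g : PySem.Dict String (List (List String))) (data : List String) :
    PySem.Dict String (List (List String)) :=
  match data.head? with
  | none => g         -- data[0] raises IndexError in Python; excluded by Pre_
  | some k => g.modify k [] (fun lst => lst ++ [data])

-- phase 2 for one group: base = group[0]; merge every later record onto it
def mergeGroup (group : List (List String)) : List String :=
  match group with
  | [] => []          -- unreachable: every group holds at least the record that created it
  | base :: rest => rest.foldl mergeLoop base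

def double_delete_alt (text : List (List String)) : List (List String) :=
  ((text.foldl stepB PySem.Dict.empty).values).map mergeGroup

-- ===== PRECONDITION & SPEC =====
-- Pre_ excludes exactly the inputs where the Python A raises IndexError: a record that is empty
-- (data[0]), or a record shorter than the first earlier record sharing its first field (data[ind]).
def Pre_double_delete (text : List (List String)) : Prop :=
  (∀ d ∈ text, d ≠ []) ∧
  ∀ j ∈ List.range text.length, ∀ i ∈ List.range j,
    (text.getD i []).head? = (text.getD j []).head? →
    (∀ i' ∈ List.range i, (text.getD i' []).head? ≠ (text.getD i []).head?) →
    (text.getD i []).length ≤ (text.getD j []).length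
instance (text : List (List String)) : Decidable (Pre_double_delete text) := by
  unfold Pre_double_delete; infer_instance

def pvWitness_double_delete : List (List String) :=
  [["a", "1"], ["a", "", "2"], ["b", "x"]]

def Spec_double_delete (text : List (List String)) (out : List (List String)) : Prop := out = double_delete_alt text
instance (text : List (List String)) (out : List (List String)) : Decidable (Spec_double_delete text out) := by unfold Spec_double_delete; infer_instance

-- ===== CLAIM (what is proved, stated in full; the proofs are below) =====
def Claim_equal_double_delete : Prop := ∀ (text : List (List String)), Dom_double_delete text → Pre_double_delete text → Spec_double_delete text (double_delete text)

-- ===== LEMMAS AND PROOFS =====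

-- relates one entry of B's group dict to the corresponding entry of A's dict
def entryF (p : String × List (List String)) : String × List String := (p.1, mergeGroup p.2)

lemma find?_map_entryF (l : List (String × List (List String))) (k : String) :
    List.find? (fun p => p.1 == k) (l.map entryF) =
      Option.map entryF (List.find? (fun p => p.1 == k) l) := by
  induction l with
  | nil => simp
  | cons p l ih =>
    by_cases h : p.1 = k
    · simp [entryF, h]
    · simp [entryF, h, ih]

lemma contains_map_entryF (l : List (String × List (List String))) (k : String) :
    (PySem.Dict.mk (l.map entryF)).contains k = (PySem.Dict.mk l).contains k := by
  simp only [PySem.Dict.contains, List.any_map]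
  congr 1

lemma mergeGroup_append (lst : List (List String)) (data : List String) (h : lst ≠ []) :
    mergeGroup (lst ++ [data]) = mergeLoop (mergeGroup lst) data := by
  cases lst with
  | nil => exact absurd rfl h
  | cons b rest => simp [mergeGroup, List.foldl_append]

lemma step_comm (data : List String) (l : List (String × List (List String)))
    (h : ∀ p ∈ l, p.2 ≠ []) :
    stepA (PySem.Dict.mk (l.map entryF)) data =
      PySem.Dict.mk ((stepB (PySem.Dict.mk l) data).items.map entryF) := by
  cases hd : data.head? with
  | none => simp [stepA, stepB, hd]
  | some k =>
    by_cases hc : (PySem.Dict.mk l).contains k = true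
    · -- existing key
      have hfind : (List.find? (fun p => p.1 == k) l).isSome := by
        rw [List.find?_isSome]
        simpa [PySem.Dict.contains, List.any_eq_true] using hc
      obtain ⟨⟨k0, lst⟩, hf⟩ := Option.isSome_iff_exists.mp hfind
      have hk0 : k0 = k := by
        have := List.find?_some hf; simpa using this
      rw [hk0] at hf
      have hmem : (k, lst) ∈ l := List.mem_of_find?_eq_some hf
      have hne : lst ≠ [] := h _ hmem
      have hgetF : (PySem.Dict.mk (l.map entryF)).get? k = some (mergeGroup lst) := by
        simp only [PySem.Dict.get?]
        rw [find?_map_entryF, hf]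
        rfl
      have hgetD : (PySem.Dict.mk l).getD k [] = lst := by
        simp [PySem.Dict.getD, PySem.Dict.get?, hf]
      have hcF : (PySem.Dict.mk (l.map entryF)).contains k = true := by
        rw [contains_map_entryF]; exact hc
      simp only [stepA, stepB, hd, hgetF, PySem.Dict.modify, hgetD,
        PySem.Dict.insert, hc, hcF, if_pos]
      simp only [List.map_map]
      congr 1
      apply List.map_congr_left
      intro p _
      by_cases hp : p.1 = k
      · simp [Function.comp, entryF, hp, mergeGroup_append lst data hne]
      · simp [Function.comp, entryF, hp]
    · -- new key
      have hfind : List.find? (fun p => p.1 == k) l = none := by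
        rw [List.find?_eq_none]
        intro x hx hpx
        exact hc (by simp only [PySem.Dict.contains, List.any_eq_true]; exact ⟨x, hx, hpx⟩)
      have hgetF : (PySem.Dict.mk (l.map entryF)).get? k = none := by
        simp only [PySem.Dict.get?]
        rw [find?_map_entryF, hfind]
        rfl
      have hgetD : (PySem.Dict.mk l).getD k [] = [] := by
        simp [PySem.Dict.getD, PySem.Dict.get?, hfind]
      have hcF : ¬ (PySem.Dict.mk (l.map entryF)).contains k = true := by
        rw [contains_map_entryF]; exact hc
      simp [stepA, stepB, hd, hgetF, PySem.Dict.modify, hgetD,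
        PySem.Dict.insert, hc, hcF, entryF, mergeGroup]

lemma stepB_ne (data : List String) (l : List (String × List (List String)))
    (h : ∀ p ∈ l, p.2 ≠ []) :
    ∀ p ∈ (stepB (PySem.Dict.mk l) data).items, p.2 ≠ [] := by
  cases hd : data.head? with
  | none => simpa [stepB, hd] using h
  | some k =>
    intro p hp
    simp only [stepB, hd, PySem.Dict.modify, PySem.Dict.insert] at hp
    split at hp
    · simp only [List.mem_map] at hp
      obtain ⟨q, hq, hpq⟩ := hp
      by_cases hqk : q.1 = k
      · simp only [hqk, BEq.rfl, if_true] at hpq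
        subst hpq; simp
      · simp only [hqk, beq_iff_eq, if_false] at hpq
        subst hpq; exact h q hq
    · simp only [List.mem_append, List.mem_singleton] at hp
      rcases hp with hp | hp
      · exact h p hp
      · subst hp; simp

lemma fold_comm (text : List (List String)) :
    ∀ l : List (String × List (List String)), (∀ p ∈ l, p.2 ≠ []) →
      List.foldl stepA (PySem.Dict.mk (l.map entryF)) text =
        PySem.Dict.mk ((List.foldl stepB (PySem.Dict.mk l) text).items.map entryF) := by
  induction text with
  | nil => intro l _; rfl
  | cons data text ih =>
    intro l h
    simp only [List.foldl_cons]
    rw [step_comm data l h]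
    exact ih _ (stepB_ne data l h)

-- ===== VERDICT (by name: the statement is the Claim_ definition above) =====
theorem double_delete_spec : Claim_equal_double_delete := by
  intro text _ _
  unfold Spec_double_delete double_delete double_delete_alt
  have := fold_comm text [] (by simp)
  simp only [List.map_nil] at this
  rw [show (PySem.Dict.empty : PySem.Dict String (List String)) = PySem.Dict.mk [] from rfl,
    show (PySem.Dict.empty : PySem.Dict String (List (List String))) = PySem.Dict.mk [] from rfl,
    this]
  simp [PySem.Dict.values, List.map_map, Function.comp, entryF]
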